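-- pv_equiv track=rewrite | github.com/alex-s00/ethereum-blockchain-analysis | Source Code/partD/Gas Guzzlers/gas3.py | combiner2
-- ===== SOURCE A (Python) =====
-- def combiner2(word,counts):
--
-- 	count = 0
-- 	totalDifficulty = 0
-- 	totalGas = 0
-- 	for each in counts :
--
-- 		totalGas += each[0]
-- 		totalDifficulty += each[1]
-- 		count += each[2]
--
-- 	yield(word,(totalGas, totalDifficulty, count))
-- ===== SOURCE B (Python) =====
-- def combiner2(word, counts):
--     if counts:
--         totalGas, totalDifficulty, count = (sum(col) for col in zip(*counts))
--     else:
--         totalGas, totalDifficulty, count = 0, 0, 0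
--     yield (word, (totalGas, totalDifficulty, count))
-- ===== Notes on version B (the rewrite author's own statement) =====
-- stated objective: idiomatic
-- what changed: B transposes counts with zip(*counts) and sums each column, instead of A's single loop accumulating three running totals per row.
import Mathlib
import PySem

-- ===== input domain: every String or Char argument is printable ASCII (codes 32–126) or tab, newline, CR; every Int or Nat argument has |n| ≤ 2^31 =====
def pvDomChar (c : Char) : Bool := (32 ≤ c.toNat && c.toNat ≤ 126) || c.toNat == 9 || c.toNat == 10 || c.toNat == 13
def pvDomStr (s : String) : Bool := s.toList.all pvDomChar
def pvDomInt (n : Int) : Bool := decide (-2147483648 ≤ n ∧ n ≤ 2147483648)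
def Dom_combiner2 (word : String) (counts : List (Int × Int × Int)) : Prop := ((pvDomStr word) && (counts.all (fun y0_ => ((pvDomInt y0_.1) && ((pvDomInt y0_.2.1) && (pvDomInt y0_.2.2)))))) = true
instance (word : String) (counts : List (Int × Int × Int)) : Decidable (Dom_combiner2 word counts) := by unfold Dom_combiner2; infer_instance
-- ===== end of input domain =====

-- B sums the three transposed columns of counts instead of A's row-by-row accumulator loop (idiomatic; same cost).
-- Both Pythons are generators yielding exactly one tuple; ported as the singleton list of that tuple.

-- ===== PORT A =====
-- A: loop over counts accumulating (totalGas, totalDifficulty, count); yield one tuple.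
def combiner2 (word : String) (counts : List (Int × Int × Int)) : List (String × (Int × Int × Int)) :=
  let acc := counts.foldl
    (fun (s : Int × Int × Int) each =>
      (s.1 + each.1, s.2.1 + each.2.1, s.2.2 + each.2.2))
    (0, 0, 0)
  [(word, (acc.1, acc.2.1, acc.2.2))]

-- ===== PORT B =====
-- B: transpose counts and sum each column (empty-list guard as in Source B).
def combiner2_alt (word : String) (counts : List (Int × Int × Int)) : List (String × (Int × Int × Int)) :=
  let t : Int × Int × Int :=
    if counts ≠ [] then
      ((counts.map (fun p => p.1)).sum,
       (counts.map (fun p => p.2.1)).sum,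
       (counts.map (fun p => p.2.2)).sum)
    else (0, 0, 0)
  [(word, t)]

-- ===== PRECONDITION & SPEC =====
def Spec_combiner2 (word : String) (counts : List (Int × Int × Int)) (out : List (String × (Int × Int × Int))) : Prop := out = combiner2_alt word counts
instance (word : String) (counts : List (Int × Int × Int)) (out : List (String × (Int × Int × Int))) : Decidable (Spec_combiner2 word counts out) := by unfold Spec_combiner2; infer_instance

-- ===== CLAIM (what is proved, stated in full; the proofs are below) =====
def Claim_equal_combiner2 : Prop := ∀ (word : String) (counts : List (Int × Int × Int)), Dom_combiner2 word counts → Spec_combiner2 word counts (combiner2 word counts)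

-- ===== LEMMAS AND PROOFS =====
theorem combiner2_foldl_sum (counts : List (Int × Int × Int)) (g d c : Int) :
    counts.foldl
      (fun (s : Int × Int × Int) each =>
        (s.1 + each.1, s.2.1 + each.2.1, s.2.2 + each.2.2)) (g, d, c)
    = (g + (counts.map (fun p => p.1)).sum,
       d + (counts.map (fun p => p.2.1)).sum,
       c + (counts.map (fun p => p.2.2)).sum) := by
  induction counts generalizing g d c with
  | nil => simp
  | cons h t ih => simp [List.foldl, ih]; ring_nf; tauto

-- ===== VERDICT (by name: the statement is the Claim_ definition above) =====
theorem combiner2_spec : Claim_equal_combiner2 := by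
  intro word counts _
  unfold Spec_combiner2 combiner2 combiner2_alt
  rcases counts with _ | ⟨h, t⟩
  · simp
  · simp only [List.foldl_cons]
    rw [combiner2_foldl_sum]
    simp
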